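-- pv_equiv track=rewrite | github.com/durufle/pyjlink | pyjlink/util.py | calculate_parity
-- ===== SOURCE A (Python) =====
-- def is_natural(val) -> bool:
--     """Returns whether the given value is a natural number.
--
--     Args:
--       val (object): value to check
--
--     Returns:
--       ``True`` if the given value is a natural number, otherwise ``False``.
--     """
--     return isinstance(val, int) and val >= 0
--
-- def calculate_parity(n):
--     """
--     Calculates and returns the parity of a number.
--
--     The parity of a number is ``1`` if the number has an odd number of ones
--     in its binary representation, otherwise ``0``.
--
--     Args:
--       n (int): the number whose parity to calculate
--
--     Returns:
--       ``1`` if the number has an odd number of ones, otherwise ``0``.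
--
--     Raises:
--       ValueError: if ``n`` is less than ``0``.
--     """
--     if not is_natural(n):
--         raise ValueError('Expected n to be a positive integer.')
--
--     y = 0
--     n = abs(n)
--     while n:
--         y += n & 1
--         n = n >> 1
--     return y & 1
-- ===== SOURCE B (Python) =====
-- def is_natural(val) -> bool:
--     return isinstance(val, int) and val >= 0
--
-- def calculate_parity(n):
--     if not is_natural(n):
--         raise ValueError('Expected n to be a positive integer.')
--     return bin(n).count('1') & 1
-- ===== Notes on version B (the rewrite author's own statement) =====
-- stated objective: idiomatic
-- what changed: Replaces A's shift-and-accumulate bit loop with the idiomatic one-liner that builds the binary string representation via bin, counts the set-bit digit characters in it, and takes the low bit of that count.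
import Mathlib
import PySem

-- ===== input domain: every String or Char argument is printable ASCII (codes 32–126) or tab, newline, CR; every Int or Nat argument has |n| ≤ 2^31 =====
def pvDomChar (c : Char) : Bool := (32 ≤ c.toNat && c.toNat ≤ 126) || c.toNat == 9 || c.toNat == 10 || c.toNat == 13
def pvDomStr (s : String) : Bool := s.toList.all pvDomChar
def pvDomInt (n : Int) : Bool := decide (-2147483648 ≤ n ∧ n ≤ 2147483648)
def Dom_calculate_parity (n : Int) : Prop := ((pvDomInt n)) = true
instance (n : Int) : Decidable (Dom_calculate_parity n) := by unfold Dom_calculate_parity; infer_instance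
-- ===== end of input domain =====

-- B replaces A's shift-and-accumulate bit loop with building the binary string
-- representation (Python's bin) and counting its set-bit digit characters; same values on 0 ≤ n.


-- ===== PORT A =====
-- while n: y += n & 1; n = n >> 1
def pvLoopA (n y : Nat) : Nat :=
  if n = 0 then y else pvLoopA (n >>> 1) (y + (n &&& 1))
decreasing_by simp [Nat.shiftRight_one]; omega

-- A raises ValueError on n < 0 (excluded by Pre_); the 'else 0' branch is that raise.
def calculate_parity (n : Int) : Int :=
  if n < 0 then 0
  else (((pvLoopA n.natAbs 0) &&& 1 : Nat) : Int)   -- n = abs(n); then the while loop; return y & 1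

-- ===== PORT B =====
-- the digits of Python's bin(n) after the '0b' prefix, most significant first (empty for 0)
def pvBinDigits (n : Nat) : List Char :=
  if n = 0 then [] else pvBinDigits (n / 2) ++ [if n % 2 = 1 then '1' else '0']
decreasing_by omega

-- bin(n) for n ≥ 0: '0b' prefix, then the digits ('0b0' for 0)
def pvBin (n : Nat) : List Char :=
  '0' :: 'b' :: (if n = 0 then ['0'] else pvBinDigits n)

-- return bin(n).count('1') & 1
def calculate_parity_alt (n : Int) : Int :=
  if n < 0 then 0
  else ((((pvBin n.natAbs).count '1') &&& 1 : Nat) : Int)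

-- ===== PRECONDITION & SPEC =====
-- Pre_ excludes exactly the inputs on which Python A raises ValueError (n < 0).
def Pre_calculate_parity (n : Int) : Prop := 0 ≤ n
instance (n : Int) : Decidable (Pre_calculate_parity n) := by unfold Pre_calculate_parity; infer_instance
def pvWitness_calculate_parity : Int := (6)

def Spec_calculate_parity (n : Int) (out : Int) : Prop := out = calculate_parity_alt n
instance (n : Int) (out : Int) : Decidable (Spec_calculate_parity n out) := by unfold Spec_calculate_parity; infer_instance

-- ===== CLAIM (what is proved, stated in full; the proofs are below) =====
def Claim_equal_calculate_parity : Prop := ∀ (n : Int), Dom_calculate_parity n → Pre_calculate_parity n → Spec_calculate_parity n (calculate_parity n)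

-- ===== LEMMAS AND PROOFS =====
theorem pvLoopA_zero (y : Nat) : pvLoopA 0 y = y := by rw [pvLoopA.eq_def]; simp

theorem pvLoopA_acc (n : Nat) : ∀ y, pvLoopA n y = y + pvLoopA n 0 := by
  induction n using Nat.strong_induction_on with
  | _ n ih =>
    intro y
    by_cases h : n = 0
    · subst h; rw [pvLoopA_zero, pvLoopA_zero]; omega
    · have hlt : n >>> 1 < n := by rw [Nat.shiftRight_one]; omega
      rw [pvLoopA.eq_def, if_neg h]
      conv_rhs => rw [pvLoopA.eq_def, if_neg h]
      rw [ih _ hlt, ih _ hlt (0 + (n &&& 1))]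
      omega

-- A's running count equals the number of '1' characters among the binary digits.
theorem count_binDigits (n : Nat) : (pvBinDigits n).count '1' = pvLoopA n 0 := by
  induction n using Nat.strong_induction_on with
  | _ n ih =>
    by_cases h : n = 0
    · subst h; rw [pvBinDigits, pvLoopA_zero]; simp
    · rw [pvBinDigits, if_neg h, List.count_append, ih (n / 2) (by omega)]
      conv_rhs => rw [pvLoopA.eq_def, if_neg h, pvLoopA_acc,
        Nat.shiftRight_one, Nat.and_one_is_mod]
      by_cases hp : n % 2 = 1 <;> simp [hp] <;> omega

theorem count_bin (n : Nat) : (pvBin n).count '1' = pvLoopA n 0 := by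
  by_cases h : n = 0
  · subst h; rw [pvBin, pvLoopA_zero]; simp
  · rw [pvBin, if_neg h]
    simp [count_binDigits]

-- ===== VERDICT (by name: the statement is the Claim_ definition above) =====
theorem calculate_parity_spec : Claim_equal_calculate_parity := by
  intro n _ hpre
  unfold Pre_calculate_parity at hpre
  have hlt : ¬ n < 0 := by omega
  unfold Spec_calculate_parity calculate_parity calculate_parity_alt
  rw [if_neg hlt, if_neg hlt, count_bin]
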